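-- pv_equiv track=rewrite | github.com/ethanlim04/CCC | 2017/2017-s2.py | getOut
-- ===== SOURCE A (Python) =====
-- def getOut(n, arr, odd):
--     out = []
--     t1 = arr[0:int(n/2)]
--     t2 = arr[int(n/2):n]
--     t1 = t1[::-1]
--     if(not odd):
--         for i in range(int(n/2)):
--
--             out.append(t1[i])
--             out.append(t2[i])
--     else:
--         for i in range(int(n/2)):
--
--             out.append(t2[i])
--             out.append(t1[i])
--     return out
-- ===== SOURCE B (Python) =====
-- def getOut(n, arr, odd):
--     half = int(n / 2)
--
--     def src(j):
--         q, r = divmod(j, 2)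
--         if (r == 1) == bool(odd):
--             return half - 1 - q
--         return half + q
--
--     return [arr[src(j)] for j in range(2 * half)]
-- ===== Notes on version B (the rewrite author's own statement) =====
-- stated objective: alternative
-- what changed: B never slices, reverses or interleaves: it computes each output element directly from arr by a closed-form position-to-source index map (divmod of the output index decides first-half-reversed vs second-half), one map over output positions instead of A's slice+reverse+append loop.
import Mathlib
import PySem

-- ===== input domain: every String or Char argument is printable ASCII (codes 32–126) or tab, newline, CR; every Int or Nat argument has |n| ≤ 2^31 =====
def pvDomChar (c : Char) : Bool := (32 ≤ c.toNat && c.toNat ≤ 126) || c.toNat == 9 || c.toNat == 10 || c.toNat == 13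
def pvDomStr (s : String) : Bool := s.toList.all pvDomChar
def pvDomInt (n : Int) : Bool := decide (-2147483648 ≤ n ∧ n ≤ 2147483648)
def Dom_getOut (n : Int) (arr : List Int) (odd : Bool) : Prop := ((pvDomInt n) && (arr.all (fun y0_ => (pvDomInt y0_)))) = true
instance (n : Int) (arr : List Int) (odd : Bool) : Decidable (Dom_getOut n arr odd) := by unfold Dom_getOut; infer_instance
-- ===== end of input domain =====

-- B computes each output element directly from arr via a closed-form index map on the
-- output position (no slicing, reversal or interleaving); objective: alternative.

-- ===== PORT A =====
def getOut (n : Int) (arr : List Int) (odd : Bool) : List Int :=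
  let out : List Int := []
  let t1 := PySem.List.slice arr (some 0) (some (PySem.Int.truncdiv n 2))   -- arr[0:int(n/2)]
  let t2 := PySem.List.slice arr (some (PySem.Int.truncdiv n 2)) (some n)  -- arr[int(n/2):n]
  let t1 := t1.reverse                                                      -- t1[::-1]
  if !odd then
    (PySem.List.pyRange 0 (PySem.Int.truncdiv n 2) 1).foldl
      (fun out i => out ++ [PySem.List.pyGetD t1 i 0] ++ [PySem.List.pyGetD t2 i 0]) out
  else
    (PySem.List.pyRange 0 (PySem.Int.truncdiv n 2) 1).foldl
      (fun out i => out ++ [PySem.List.pyGetD t2 i 0] ++ [PySem.List.pyGetD t1 i 0]) out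

-- ===== PORT B =====
def getOut_alt (n : Int) (arr : List Int) (odd : Bool) : List Int :=
  let half := PySem.Int.truncdiv n 2
  (PySem.List.pyRange 0 (2 * half) 1).map (fun j =>
    let q := PySem.Int.floordiv j 2
    let r := PySem.Int.mod j 2
    let idx := if decide (r = 1) = odd then half - 1 - q else half + q
    PySem.List.pyGetD arr idx 0)

-- ===== PRECONDITION & SPEC =====
-- Pre_ excludes exactly the inputs on which A raises IndexError: t1[i] or t2[i] out of
-- range, which happens iff the array is shorter than 2*int(n/2).
def Pre_getOut (n : Int) (arr : List Int) (odd : Bool) : Prop :=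
  2 * PySem.Int.truncdiv n 2 ≤ (arr.length : Int)
instance (n : Int) (arr : List Int) (odd : Bool) : Decidable (Pre_getOut n arr odd) := by unfold Pre_getOut; infer_instance
def pvWitness_getOut : Int × List Int × Bool := (4, [1, 2, 3, 4], false)

def Spec_getOut (n : Int) (arr : List Int) (odd : Bool) (out : List Int) : Prop := out = getOut_alt n arr odd
instance (n : Int) (arr : List Int) (odd : Bool) (out : List Int) : Decidable (Spec_getOut n arr odd out) := by unfold Spec_getOut; infer_instance

-- ===== CLAIM (what is proved, stated in full; the proofs are below) =====
def Claim_equal_getOut : Prop := ∀ (n : Int) (arr : List Int) (odd : Bool), Dom_getOut n arr odd → Pre_getOut n arr odd → Spec_getOut n arr odd (getOut n arr odd)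

-- ===== LEMMAS AND PROOFS =====

theorem pv_tdiv_two_nonpos (n : Int) (h : n < 0) : n.tdiv 2 ≤ 0 := by
  have h1 : n.tdiv 2 = -((-n).tdiv 2) := by rw [← Int.neg_tdiv, neg_neg]
  have h2 : (-n).tdiv 2 = (-n) / 2 := Int.tdiv_eq_ediv_of_nonneg (by omega)
  omega

theorem pv_two_mul_tdiv_two_le (n : Int) (h : 0 ≤ n) : 2 * n.tdiv 2 ≤ n := by
  rw [Int.tdiv_eq_ediv_of_nonneg h]; omega

theorem pv_flatMap_congr {α β : Type} (l : List α) (g g' : α → List β)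
    (h : ∀ a ∈ l, g a = g' a) : l.flatMap g = l.flatMap g' := by
  induction l with
  | nil => rfl
  | cons x xs ih =>
    simp only [List.flatMap_cons]
    rw [h x (List.mem_cons_self), ih (fun a ha => h a (List.mem_cons_of_mem _ ha))]

theorem pv_map_range_two (m : Nat) (f : Nat → Int) :
    (List.range (2 * m)).map f
      = (List.range m).flatMap (fun k => [f (2 * k), f (2 * k + 1)]) := by
  induction m with
  | zero => simp
  | succ m ih =>
    have h2 : 2 * (m + 1) = (2 * m + 1) + 1 := by ring
    rw [h2, List.range_succ, List.range_succ, List.range_succ,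
      List.map_append, List.map_append, ih, List.flatMap_append]
    simp

theorem getOut_spec : Claim_equal_getOut := by
  intro n arr odd _ hpre
  unfold Pre_getOut at hpre
  unfold Spec_getOut getOut getOut_alt
  by_cases hpos : 0 < PySem.Int.truncdiv n 2
  · -- positive half
    have htd : PySem.Int.truncdiv n 2 = n.tdiv 2 := rfl
    have hn : 0 ≤ n := by
      by_contra hneg
      have := pv_tdiv_two_nonpos n (by omega)
      rw [htd] at hpos; omega
    have h2n : 2 * PySem.Int.truncdiv n 2 ≤ n := by
      rw [htd]; exact pv_two_mul_tdiv_two_le n hn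
    set h : Int := PySem.Int.truncdiv n 2 with hdef
    set m : Nat := h.toNat with hm
    have hcast : h = (m : Int) := by omega
    have hlen : 2 * m ≤ arr.length := by omega
    have hnm : 2 * m ≤ n.toNat := by omega
    -- the slices of A
    have ht1 : PySem.List.slice arr (some 0) (some h) = arr.take m := by
      rw [PySem.List.slice_toNat arr (by omega) (by omega)]; simp; omega
    have ht2 : PySem.List.slice arr (some h) (some n) =
        (arr.drop m).take (n.toNat - m) := by
      rw [PySem.List.slice_toNat arr (by omega) hn]
    -- A's foldl is a flatMap over range m
    have hbody : ∀ (t1 t2 : List Int),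
        (PySem.List.pyRange 0 h 1).foldl
          (fun out i => out ++ [PySem.List.pyGetD t1 i 0] ++ [PySem.List.pyGetD t2 i 0]) []
        = (List.range m).flatMap (fun k => [t1.getD k 0, t2.getD k 0]) := by
      intro t1 t2
      have hfun : (fun (out : List Int) (i : Int) =>
          out ++ [PySem.List.pyGetD t1 i 0] ++ [PySem.List.pyGetD t2 i 0])
        = (fun (out : List Int) (i : Int) =>
          out ++ ([PySem.List.pyGetD t1 i 0] ++ [PySem.List.pyGetD t2 i 0])) := by
        funext o i; rw [List.append_assoc]
      rw [hfun, PySem.List.foldl_append_eq_flatMap, PySem.List.pyRange_one,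
        List.flatMap_map]
      simp [hm]
    -- B is a flatMap over range m of the two arithmetically-indexed elements
    have h2h : ((2 * h - 0).toNat) = 2 * m := by omega
    have hB : (PySem.List.pyRange 0 (2 * h) 1).map (fun j =>
          PySem.List.pyGetD arr
            (if decide (PySem.Int.mod j 2 = 1) = odd then
              h - 1 - PySem.Int.floordiv j 2 else h + PySem.Int.floordiv j 2) 0)
        = (List.range m).flatMap (fun k =>
            [PySem.List.pyGetD arr
              (if decide (PySem.Int.mod ((2*k : Nat) : Int) 2 = 1) = odd then
                h - 1 - PySem.Int.floordiv ((2*k : Nat) : Int) 2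
               else h + PySem.Int.floordiv ((2*k : Nat) : Int) 2) 0,
             PySem.List.pyGetD arr
              (if decide (PySem.Int.mod ((2*k+1 : Nat) : Int) 2 = 1) = odd then
                h - 1 - PySem.Int.floordiv ((2*k+1 : Nat) : Int) 2
               else h + PySem.Int.floordiv ((2*k+1 : Nat) : Int) 2) 0]) := by
      rw [PySem.List.pyRange_one, List.map_map, h2h,
        pv_map_range_two m (fun k => _)]
      simp [Function.comp]
    -- arithmetic evaluation of the index map
    have hqr0 : ∀ k : Nat, PySem.Int.floordiv ((2*k : Nat) : Int) 2 = (k : Int) ∧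
        PySem.Int.mod ((2*k : Nat) : Int) 2 = 0 := by
      intro k
      constructor
      · rw [PySem.Int.floordiv_eq_ediv_of_pos (by norm_num)]; push_cast; omega
      · rw [PySem.Int.mod_eq_emod_of_pos (by norm_num)]; push_cast; omega
    have hqr1 : ∀ k : Nat, PySem.Int.floordiv ((2*k+1 : Nat) : Int) 2 = (k : Int) ∧
        PySem.Int.mod ((2*k+1 : Nat) : Int) 2 = 1 := by
      intro k
      constructor
      · rw [PySem.Int.floordiv_eq_ediv_of_pos (by norm_num)]; push_cast; omega
      · rw [PySem.Int.mod_eq_emod_of_pos (by norm_num)]; push_cast; omega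
    -- per-element agreement of the two constructions
    have hA1 : ∀ k, k < m → ((arr.take m).reverse).getD k 0
        = PySem.List.pyGetD arr (h - 1 - (k : Int)) 0 := by
      intro k hk
      have hlt : k < ((arr.take m).reverse).length := by simp; omega
      have hi0 : (0:Int) ≤ h - 1 - (k : Int) := by omega
      have hi1 : h - 1 - (k : Int) < (arr.length : Int) := by omega
      rw [PySem.List.pyGetD_eq_getElem arr 0 hi0 hi1,
        List.getD_eq_getElem _ _ hlt]
      rw [List.getElem_reverse]
      have e1 : (arr.take m).length - 1 - k = m - 1 - k := by simp; omega
      have e2 : (h - 1 - (k : Int)).toNat = m - 1 - k := by omega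
      simp only [e1, e2]
      rw [List.getElem_take]
    have hA2 : ∀ k, k < m → ((arr.drop m).take (n.toNat - m)).getD k 0
        = PySem.List.pyGetD arr (h + (k : Int)) 0 := by
      intro k hk
      have hlt : k < ((arr.drop m).take (n.toNat - m)).length := by simp; omega
      have hi0 : (0:Int) ≤ h + (k : Int) := by omega
      have hi1 : h + (k : Int) < (arr.length : Int) := by omega
      rw [PySem.List.pyGetD_eq_getElem arr 0 hi0 hi1,
        List.getD_eq_getElem _ _ hlt]
      have e2 : (h + (k : Int)).toNat = m + k := by omega
      simp only [List.getElem_take, List.getElem_drop, e2]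
    cases odd with
    | false =>
      simp only [ht1, ht2, Bool.not_false, if_true]
      rw [hbody, hB]
      apply pv_flatMap_congr
      intro k hkmem
      have hk : k < m := List.mem_range.mp hkmem
      rw [(hqr0 k).1, (hqr0 k).2, (hqr1 k).1, (hqr1 k).2]
      simp only [hA1 k hk, hA2 k hk]
      norm_num
    | true =>
      simp only [ht1, ht2, Bool.not_true, Bool.false_eq_true, if_false]
      rw [hbody, hB]
      apply pv_flatMap_congr
      intro k hkmem
      have hk : k < m := List.mem_range.mp hkmem
      rw [(hqr0 k).1, (hqr0 k).2, (hqr1 k).1, (hqr1 k).2]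
      simp only [hA1 k hk, hA2 k hk]
      norm_num
  · -- nonpositive half: A's loop range and B's output range are both empty
    have hr : PySem.List.pyRange 0 (PySem.Int.truncdiv n 2) 1 = [] :=
      PySem.List.pyRange_one_eq_nil (by omega)
    have hr2 : PySem.List.pyRange 0 (2 * PySem.Int.truncdiv n 2) 1 = [] :=
      PySem.List.pyRange_one_eq_nil (by omega)
    cases odd <;> simp [hr, hr2]
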